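-- pv_equiv track=rewrite | github.com/MaJiho/crowns-solver | utils/logic.py | find_matching_entries
-- ===== SOURCE A (Python) =====
-- from itertools import combinations
-- from typing import Dict, List, TypeVar, Any
--
-- K = TypeVar('K')
--
-- def find_matching_entries(dictionary: Dict[K, List[Any]], threshold: int) -> List[K]:
--     """
--     Function to find X entries in the dictionary D where the combined values form a set of size X.
--
--     Args:
--         dictionary (dict): A dictionary where keys are objects and values are lists of objects.
--         threshold (int): The number of entries to select and the target number of distinct elements in the combined set.
--
--     Returns:
--         list: A list of X entries from D whose combined values form a set with exactly X elements.
--         None: If no such combination exists.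
--     """
--     # Filter out dictionary entries where the list length is greater than X
--     filtered_dict = {k: v for k, v in dictionary.items() if len(v) <= threshold}
--
--     # Generate all combinations of X entries from the filtered dictionary
--     for selected_entries in combinations(filtered_dict.items(), threshold):
--         # Combine all lists of the selected entries
--         combined_values = set()
--         for _, value_list in selected_entries:
--             combined_values.update(value_list)
--
--         # If the size of the combined set is equal to X, return the combination
--         if len(combined_values) == threshold:
--             return [entry[0] for entry in selected_entries]
--
--     # If no valid combination is found
--     return None
-- ===== SOURCE B (Python) =====
-- def find_matching_entries(dictionary, threshold):
--     """Recursive take/skip backtracking over the filtered entries, threading the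
--     accumulated union set; prunes branches whose union already exceeds threshold
--     or that have too few entries left to complete."""
--     entries = [(k, v) for k, v in dictionary.items() if len(v) <= threshold]
--
--     def search(i, need, keys, acc):
--         if len(acc) > threshold:
--             return None
--         if need == 0:
--             return keys if len(acc) == threshold else None
--         if len(entries) - i < need:
--             return None
--         k, v = entries[i]
--         taken = search(i + 1, need - 1, keys + [k], acc | set(v))
--         return taken if taken is not None else search(i + 1, need, keys, acc)
--
--     return search(0, threshold, [], set())
-- ===== Notes on version B (the rewrite author's own statement) =====
-- stated objective: alternative
-- what changed: Replaces the itertools.combinations enumeration (materialising each combination and recomputing its value-union from scratch) by a recursive take/skip backtracking search that threads the accumulated union set down the recursion and prunes any branch whose union already exceeds threshold.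
import Mathlib
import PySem

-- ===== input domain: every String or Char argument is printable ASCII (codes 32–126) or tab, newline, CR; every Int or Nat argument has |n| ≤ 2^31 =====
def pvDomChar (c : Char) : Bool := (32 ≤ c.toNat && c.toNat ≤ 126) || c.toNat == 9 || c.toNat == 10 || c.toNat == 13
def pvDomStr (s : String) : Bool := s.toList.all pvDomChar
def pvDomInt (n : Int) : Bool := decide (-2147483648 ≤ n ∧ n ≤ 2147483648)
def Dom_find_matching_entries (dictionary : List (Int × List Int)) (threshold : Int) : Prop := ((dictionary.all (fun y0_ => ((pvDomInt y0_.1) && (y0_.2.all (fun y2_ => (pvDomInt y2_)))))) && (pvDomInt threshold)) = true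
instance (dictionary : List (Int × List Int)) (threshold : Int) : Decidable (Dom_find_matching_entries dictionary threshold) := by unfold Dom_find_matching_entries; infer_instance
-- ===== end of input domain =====

-- B replaces the itertools.combinations enumeration by a recursive take/skip
-- backtracking search threading the accumulated union set (same results, alternative algorithm).


-- ===== PORT A =====
-- itertools.combinations(xs, r) in itertools order (increasing indices)
def pyCombos {α : Type} : Nat → List α → List (List α)
  | 0, _ => [[]]
  | _ + 1, [] => []
  | n + 1, x :: xs => (pyCombos n xs).map (fun c => x :: c) ++ pyCombos (n + 1) xs

def find_matching_entries (dictionary : List (Int × List Int)) (threshold : Int) : Option (List Int) :=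
  -- the dict argument: assoc list read with Python dict construction semantics
  let items := (PySem.Dict.ofList dictionary).items
  -- filtered_dict = {k: v for k, v in dictionary.items() if len(v) <= threshold}
  let filtered := items.filter (fun kv => (kv.2.length : Int) ≤ threshold)
  -- for selected_entries in combinations(filtered_dict.items(), threshold): …
  (pyCombos threshold.toNat filtered).findSome? (fun sel =>
    let combined := sel.foldl (fun s kv => PySem.Set.update s kv.2) (PySem.Set.empty)
    if (combined.length : Int) = threshold then some (sel.map Prod.fst) else none)

-- ===== PORT B =====
def fmeSearch (threshold : Int) (rest : List (Int × List Int)) (need : Int)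
    (keys : List Int) (acc : PySem.Set Int) : Option (List Int) :=
  if (acc.length : Int) > threshold then none
  else if need = 0 then (if (acc.length : Int) = threshold then some keys else none)
  else if (rest.length : Int) < need then none
  else
    match rest with
    | [] => none
    | (k, v) :: tail =>
      match fmeSearch threshold tail (need - 1) (keys ++ [k]) (PySem.Set.union acc v) with
      | some r => some r
      | none => fmeSearch threshold tail need keys acc
termination_by structural rest

def find_matching_entries_alt (dictionary : List (Int × List Int)) (threshold : Int) : Option (List Int) :=
  let entries := ((PySem.Dict.ofList dictionary).items).filter (fun kv => (kv.2.length : Int) ≤ threshold)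
  fmeSearch threshold entries threshold [] PySem.Set.empty

-- ===== PRECONDITION & SPEC =====
-- Pre_ excludes threshold < 0, on which A raises ValueError (itertools.combinations with negative r).
def Pre_find_matching_entries (dictionary : List (Int × List Int)) (threshold : Int) : Prop := 0 ≤ threshold
instance (dictionary : List (Int × List Int)) (threshold : Int) : Decidable (Pre_find_matching_entries dictionary threshold) := by unfold Pre_find_matching_entries; infer_instance
def pvWitness_find_matching_entries : (List (Int × List Int)) × Int := ([(1, [5]), (2, [6])], 2)

def Spec_find_matching_entries (dictionary : List (Int × List Int)) (threshold : Int) (out : Option (List Int)) : Prop := out = find_matching_entries_alt dictionary threshold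
instance (dictionary : List (Int × List Int)) (threshold : Int) (out : Option (List Int)) : Decidable (Spec_find_matching_entries dictionary threshold out) := by unfold Spec_find_matching_entries; infer_instance

-- ===== CLAIM (what is proved, stated in full; the proofs are below) =====
def Claim_equal_find_matching_entries : Prop := ∀ (dictionary : List (Int × List Int)) (threshold : Int), Dom_find_matching_entries dictionary threshold → Pre_find_matching_entries dictionary threshold → Spec_find_matching_entries dictionary threshold (find_matching_entries dictionary threshold)

-- ===== LEMMAS AND PROOFS =====

-- the union only grows under Set.update
lemma len_le_update (v : List Int) (acc : PySem.Set Int) :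
    acc.length ≤ (PySem.Set.update acc v).length := by
  induction v generalizing acc with
  | nil => simp [PySem.Set.update]
  | cons x xs ih =>
    rw [PySem.Set.update_cons]
    exact le_trans (by rw [PySem.Set.add_eq_ite]; split <;> simp) (ih _)

lemma len_le_foldl_update (sel : List (Int × List Int)) (acc : PySem.Set Int) :
    acc.length ≤ (sel.foldl (fun s kv => PySem.Set.update s kv.2) acc).length := by
  induction sel generalizing acc with
  | nil => simp
  | cons p ps ih => exact le_trans (len_le_update p.2 acc) (ih _)

-- the combination-enumeration body of A, generalised to a start set and a key prefix
def fmeBody (t : Int) (keys : List Int) (acc : PySem.Set Int) (sel : List (Int × List Int)) : Option (List Int) :=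
  let combined := sel.foldl (fun s kv => PySem.Set.update s kv.2) acc
  if (combined.length : Int) = t then some (keys ++ sel.map Prod.fst) else none

lemma fmeBody_none_of_big (t : Int) (keys : List Int) (acc : PySem.Set Int)
    (h : (acc.length : Int) > t) (sel : List (Int × List Int)) : fmeBody t keys acc sel = none := by
  have := len_le_foldl_update sel acc
  simp only [fmeBody]
  split
  · next hc => exfalso; omega
  · rfl

-- both sides are none once the accumulated union is already too big
lemma fme_big (t : Int) (rest : List (Int × List Int)) (n : Nat) (keys : List Int)
    (acc : PySem.Set Int) (hbig : (acc.length : Int) > t) :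
    fmeSearch t rest (n : Int) keys acc = (pyCombos n rest).findSome? (fmeBody t keys acc) := by
  rw [fmeSearch.eq_def, if_pos hbig]
  symm
  exact List.findSome?_eq_none_iff.2 (fun sel _ => fmeBody_none_of_big t keys acc hbig sel)

-- shared need = 0 case of the main invariant
lemma fme_zero (t : Int) (rest : List (Int × List Int)) (keys : List Int) (acc : PySem.Set Int) :
    fmeSearch t rest 0 keys acc = (pyCombos 0 rest).findSome? (fmeBody t keys acc) := by
  by_cases hbig : (acc.length : Int) > t
  · exact fme_big t rest 0 keys acc hbig
  · rw [fmeSearch.eq_def, if_neg hbig]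
    by_cases hc : (acc.length : Int) = t <;> simp [pyCombos, List.findSome?, fmeBody, hc]

-- there is no combination of n entries from fewer than n entries
lemma pyCombos_nil_of_lt {α : Type} (n : Nat) (l : List α) (h : l.length < n) :
    pyCombos n l = [] := by
  induction l generalizing n with
  | nil => match n with | m + 1 => rfl
  | cons x xs ih =>
    match n with
    | m + 1 =>
      simp only [pyCombos, List.append_eq_nil_iff, List.map_eq_nil_iff]
      simp only [List.length_cons] at h
      exact ⟨ih m (by omega), ih (m + 1) (by omega)⟩

-- main invariant: the backtracking search equals A's enumeration started from (keys, acc)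
lemma fmeSearch_eq (t : Int) (rest : List (Int × List Int)) (n : Nat) (keys : List Int)
    (acc : PySem.Set Int) :
    fmeSearch t rest (n : Int) keys acc = (pyCombos n rest).findSome? (fmeBody t keys acc) := by
  induction rest generalizing n keys acc with
  | nil =>
    match n with
    | 0 => exact fme_zero t [] keys acc
    | m + 1 =>
      by_cases hbig : (acc.length : Int) > t
      · exact fme_big t [] (m + 1) keys acc hbig
      · rw [fmeSearch.eq_def, if_neg hbig]
        have h1 : ((m + 1 : Nat) : Int) ≠ 0 := by omega
        have h3 : ((([] : List (Int × List Int)).length : Nat) : Int) < ((m + 1 : Nat) : Int) := by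
          simp
        rw [if_neg h1, if_pos h3]
        simp [pyCombos]
  | cons p tail ih =>
    match n with
    | 0 => exact fme_zero t (p :: tail) keys acc
    | m + 1 =>
      by_cases hbig : (acc.length : Int) > t
      · exact fme_big t (p :: tail) (m + 1) keys acc hbig
      · rw [fmeSearch.eq_def, if_neg hbig]
        have h1 : ((m + 1 : Nat) : Int) ≠ 0 := by omega
        rw [if_neg h1]
        by_cases hlen : (((p :: tail).length : Nat) : Int) < ((m + 1 : Nat) : Int)
        · rw [if_pos hlen, pyCombos_nil_of_lt (m + 1) (p :: tail) (by exact_mod_cast hlen)]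
          rfl
        · rw [if_neg hlen]
          have h2 : ((m + 1 : Nat) : Int) - 1 = (m : Int) := by push_cast; ring
          obtain ⟨k, v⟩ := p
          simp only [h2, pyCombos, List.findSome?_append, List.findSome?_map]
          rw [ih m (keys ++ [k]) (PySem.Set.union acc v), ih (m + 1) keys acc]
          have hbody : (fmeBody t keys acc ∘ fun c => (k, v) :: c) =
              fmeBody t (keys ++ [k]) (PySem.Set.union acc v) := by
            funext sel
            simp [fmeBody, Function.comp, List.foldl_cons, PySem.Set.union]
          rw [hbody]
          cases hfind : (pyCombos m tail).findSome?
              (fmeBody t (keys ++ [k]) (PySem.Set.union acc v)) with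
          | some r => simp
          | none => simp

-- ===== VERDICT (by name: the statement is the Claim_ definition above) =====
theorem find_matching_entries_spec : Claim_equal_find_matching_entries := by
  intro dictionary threshold _ hpre
  unfold Spec_find_matching_entries find_matching_entries find_matching_entries_alt
  have hnat : ((threshold.toNat : Nat) : Int) = threshold := Int.toNat_of_nonneg hpre
  rw [← hnat, fmeSearch_eq]
  simp [hnat]
  congr 1
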